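-- pv_equiv track=rewrite | github.com/jacobhamblin/little-challenges | lib/possible_bin_str.py | poss_recur
-- ===== SOURCE A (Python) =====
-- def two_from_wild(str, index):
--     first = list(str)
--     second = list(str)
--     first[index] = '0'
--     second[index] = '1'
--     return [''.join(first), ''.join(second)]
--
-- def poss_recur(str):
--     list_str = list(str)
--     wilds = []
--     for index, char in enumerate(list_str):
--         if char == '?':
--             wilds.append(index)
--     strings = [str]
--     if not len(wilds):
--         return [str]
--     if len(wilds) == 1:
--         return two_from_wild(str, wilds[0])
--     else:
--         poss = two_from_wild(str, wilds[0])
--         return poss_recur(poss[0]) + poss_recur(poss[1])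
-- ===== SOURCE B (Python) =====
-- def poss_recur(str):
--     parts = [list(p) for p in str.split('?')]
--     results = [parts[0]]
--     for part in parts[1:]:
--         results = [r + [b] + part for r in results for b in '01']
--     return [''.join(r) for r in results]
-- ===== Notes on version B (the rewrite author's own statement) =====
-- stated objective: simpler
-- what changed: Replaces A's recursion that rescans the whole string for wildcard indices and rebuilds it via list-set at the first wildcard with a single str.split on the wildcard followed by one fold that extends every partial result with both bits and the next piece; output order is identical (first wildcard most significant).
import Mathlib
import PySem

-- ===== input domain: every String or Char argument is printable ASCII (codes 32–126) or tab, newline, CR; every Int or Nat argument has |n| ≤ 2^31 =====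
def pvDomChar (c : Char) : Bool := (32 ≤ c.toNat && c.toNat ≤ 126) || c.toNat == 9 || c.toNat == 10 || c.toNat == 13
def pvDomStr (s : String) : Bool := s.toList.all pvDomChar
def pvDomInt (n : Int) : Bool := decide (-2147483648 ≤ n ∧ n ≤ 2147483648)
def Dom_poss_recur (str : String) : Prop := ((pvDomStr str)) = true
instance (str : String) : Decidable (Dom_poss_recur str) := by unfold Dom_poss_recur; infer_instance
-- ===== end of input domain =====

-- B replaces A's index-hunting recursion by split-on-'?' plus one fold that extends every
-- partial result with '0'/'1' and the next piece (objective: simpler, same output order).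

-- ===== PORT A =====
-- Python list assignment first[index] = '0'; index here is always a nonnegative in-range
-- index coming from enumerate, where `.toNat` set is exact.
def two_from_wild (str : String) (index : Int) : List String :=
  let first := str.toList
  let second := str.toList
  let first := first.set index.toNat '0'
  let second := second.set index.toNat '1'
  [String.ofList first, String.ofList second]

-- the wilds-accumulating loop of A, as a named term so the termination lemmas can speak about it
def wildsOf (l : List Char) : List Int :=
  (PySem.List.enumerate l 0).foldl (fun acc ic => if ic.2 = '?' then acc ++ [ic.1] else acc) ([] : List Int)

theorem foldl_wild (xs : List (Int × Char)) :
    ∀ acc : List Int,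
      xs.foldl (fun acc ic => if ic.2 = '?' then acc ++ [ic.1] else acc) acc
        = acc ++ (xs.filter (fun p => p.2 = '?')).map (·.1) := by
  induction xs with
  | nil => simp
  | cons x xs ih =>
    intro acc
    by_cases hx : x.2 = '?'
    · simp [hx, ih, List.append_assoc]
    · simp [hx, ih]

theorem wildsOf_eq (l : List Char) :
    wildsOf l = ((PySem.List.enumerate l 0).filter (fun p => p.2 = '?')).map (·.1) := by
  simpa using foldl_wild (PySem.List.enumerate l 0) []

theorem filter_enum_nowild (v : List Char) (s : Int) (h : '?' ∉ v) :
    (PySem.List.enumerate v s).filter (fun p => p.2 = '?') = [] := by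
  rw [List.filter_eq_nil_iff]
  intro p hp
  rcases (PySem.List.mem_enumerate_iff _ _ _).mp hp with ⟨k, hk, rfl⟩
  simp only [decide_eq_true_eq]
  exact fun hq => h (hq ▸ List.getElem_mem hk)

theorem wildsOf_nowild (l : List Char) (h : '?' ∉ l) : wildsOf l = [] := by
  rw [wildsOf_eq, filter_enum_nowild _ _ h]
  rfl

theorem first_split (l : List Char) (h : '?' ∈ l) :
    ∃ u v, l = u ++ '?' :: v ∧ '?' ∉ u := by
  induction l with
  | nil => simp at h
  | cons c t ih =>
    by_cases hc : c = '?'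
    · exact ⟨[], t, by simp [hc], by simp⟩
    · have h' : '?' ∈ t := by
        rcases List.mem_cons.mp h with h0 | h0
        · exact absurd h0.symm hc
        · exact h0
      rcases ih h' with ⟨u, v, rfl, hu⟩
      exact ⟨c :: u, v, rfl, by
        intro hm
        rcases List.mem_cons.mp hm with h0 | h0
        · exact hc h0.symm
        · exact hu h0⟩

theorem wildsOf_split (u v : List Char) (h : '?' ∉ u) :
    wildsOf (u ++ '?' :: v) = (u.length : Int) ::
      ((PySem.List.enumerate v ((u.length : Int) + 1)).filter (fun p => p.2 = '?')).map (·.1) := by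
  rw [wildsOf_eq, PySem.List.enumerate_append, List.filter_append, filter_enum_nowild _ _ h,
    PySem.List.enumerate_cons]
  simp

theorem set_first (u v : List Char) (c : Char) :
    (u ++ '?' :: v).set u.length c = u ++ c :: v := by
  induction u with
  | nil => rfl
  | cons a u ih => simp [ih]

-- termination helper (cited by `decreasing_by` of the port): replacing the first '?' shrinks the '?'-count
theorem dec_two_from_wild (str : String) (c : Char) (hc : c ≠ '?')
    (h : wildsOf str.toList ≠ []) :
    (String.ofList (str.toList.set (wildsOf str.toList)[0]!.toNat c)).toList.count '?'
      < str.toList.count '?' := by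
  have hmem : '?' ∈ str.toList := by
    by_contra hm
    exact h (wildsOf_nowild _ hm)
  rcases first_split _ hmem with ⟨u, v, hl, hu⟩
  rw [hl, wildsOf_split _ _ hu]
  simp only [List.getElem!_cons_zero, Int.toNat_natCast, set_first, String.toList_ofList]
  simp [List.count_append, hc]

def poss_recur (str : String) : List String :=
  let list_str := str.toList
  let wilds := wildsOf list_str
  if wilds.length = 0 then [str]
  else if wilds.length = 1 then two_from_wild str wilds[0]!
  else
    let poss := two_from_wild str wilds[0]!
    poss_recur poss[0]! ++ poss_recur poss[1]!
termination_by str.toList.count '?'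
decreasing_by
  · rename_i h1 _h2
    simpa [two_from_wild] using
      dec_two_from_wild str '0' (by decide) (fun he => h1 (by simpa using congrArg List.length he))
  · rename_i h1 _h2
    simpa [two_from_wild] using
      dec_two_from_wild str '1' (by decide) (fun he => h1 (by simpa using congrArg List.length he))

-- ===== PORT B =====
def poss_recur_alt (str : String) : List String :=
  -- parts = [list(p) for p in str.split('?')] : splitOn already yields each piece as its char list
  let parts := PySem.Chars.splitOn str.toList ['?']
  -- results = [parts[0]] ; str.split always returns at least one piece, so index 0 is in range
  let results := [parts.headD []]
  let results := (parts.drop 1).foldl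
    (fun results part =>
      results.flatMap (fun r => [r ++ ['0'] ++ part, r ++ ['1'] ++ part]))
    results
  results.map (fun r => String.ofList r)

-- ===== PRECONDITION & SPEC =====
def Spec_poss_recur (str : String) (out : List String) : Prop := out = poss_recur_alt str
instance (str : String) (out : List String) : Decidable (Spec_poss_recur str out) := by unfold Spec_poss_recur; infer_instance

-- ===== CLAIM (what is proved, stated in full; the proofs are below) =====
def Claim_equal_poss_recur : Prop := ∀ (str : String), Dom_poss_recur str → Spec_poss_recur str (poss_recur str)

-- ===== LEMMAS AND PROOFS =====

-- the common mathematical description: all expansions of the suffix, first '?' most significant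
def expand : List Char → List (List Char)
  | [] => [[]]
  | c :: t =>
    if c = '?' then (expand t).map ('0' :: ·) ++ (expand t).map ('1' :: ·)
    else (expand t).map (c :: ·)

theorem expand_nowild (l : List Char) (h : '?' ∉ l) : expand l = [l] := by
  induction l with
  | nil => rfl
  | cons c t ih =>
    have hc : c ≠ '?' := fun hc => h (by simp [hc])
    simp [expand, hc, ih (fun hm => h (by simp [hm]))]

theorem expand_append_nowild (u t : List Char) (h : '?' ∉ u) :
    expand (u ++ t) = (expand t).map (u ++ ·) := by
  induction u with
  | nil => simp
  | cons c u ih =>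
    have hc : c ≠ '?' := fun hc => h (by simp [hc])
    simp [expand, hc, ih (fun hm => h (by simp [hm])), List.map_map, Function.comp_def]

theorem expand_split (u v : List Char) (h : '?' ∉ u) :
    expand (u ++ '?' :: v) = expand (u ++ '0' :: v) ++ expand (u ++ '1' :: v) := by
  rw [expand_append_nowild _ _ h, expand_append_nowild _ _ h, expand_append_nowild _ _ h]
  simp [expand]



theorem filter_enum_wild (v : List Char) (s : Int) (h : '?' ∈ v) :
    (PySem.List.enumerate v s).filter (fun p => p.2 = '?') ≠ [] := by
  rw [Ne, List.filter_eq_nil_iff]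
  intro hall
  rcases List.mem_iff_getElem.mp h with ⟨k, hk, hkv⟩
  have hp : ((s + k : Int), v[k]) ∈ PySem.List.enumerate v s :=
    (PySem.List.mem_enumerate_iff _ _ _).mpr ⟨k, hk, rfl⟩
  have := hall _ hp
  simp [hkv] at this


theorem poss_recur_nowild (l : List Char) (h : '?' ∉ l) :
    poss_recur (String.ofList l) = [String.ofList l] := by
  rw [poss_recur]
  simp [wildsOf_nowild l h]

theorem count_split (u v : List Char) (c : Char) (hc : c ≠ '?') :
    (u ++ c :: v).count '?' + 1 = (u ++ '?' :: v).count '?' := by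
  simp [List.count_append, hc]
  omega

theorem poss_recur_eq_expand (n : Nat) :
    ∀ l : List Char, l.count '?' ≤ n →
      poss_recur (String.ofList l) = (expand l).map String.ofList := by
  induction n with
  | zero =>
    intro l hl
    have hm : '?' ∉ l := by
      intro hmem
      have := List.count_pos_iff.mpr hmem
      omega
    rw [poss_recur_nowild l hm, expand_nowild l hm]
    rfl
  | succ n ih =>
    intro l hl
    by_cases hmem : '?' ∈ l
    · rcases first_split l hmem with ⟨u, v, rfl, hu⟩
      by_cases hv : '?' ∈ v
      · -- at least two wilds: the recursive branch
        have hrest : ((PySem.List.enumerate v ((u.length : Int) + 1)).filter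
            (fun p => p.2 = '?')).map (·.1) ≠ [] := by
          simpa using filter_enum_wild v ((u.length : Int) + 1) hv
        rw [poss_recur]
        simp only [String.toList_ofList, wildsOf_split u v hu, two_from_wild,
          List.length_cons, List.getElem!_cons_zero, Int.toNat_natCast, set_first]
        rw [if_neg (by simp), if_neg (by simpa using hrest)]
        simp only [List.getElem!_cons_zero, List.getElem!_cons_succ]
        have h0 : (u ++ '0' :: v).count '?' ≤ n := by
          have := count_split u v '0' (by decide)
          omega
        have h1 : (u ++ '1' :: v).count '?' ≤ n := by
          have := count_split u v '1' (by decide)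
          omega
        rw [ih _ h0, ih _ h1, expand_split u v hu, List.map_append]
      · -- exactly one wild
        rw [poss_recur]
        simp only [String.toList_ofList, wildsOf_split u v hu,
          filter_enum_nowild v ((u.length : Int) + 1) hv, List.map_nil, List.length_cons,
          List.length_nil, two_from_wild, List.getElem!_cons_zero, Int.toNat_natCast, set_first]
        rw [if_neg (by simp), if_true]
        rw [expand_append_nowild u ('?' :: v) hu]
        simp [expand, expand_nowild v hv]
    · rw [poss_recur_nowild l hmem, expand_nowild l hmem]
      rfl

def split1 : List Char → List (List Char)
  | [] => [[]]
  | c :: t => if c = '?' then [] :: split1 t else (split1 t).modifyHead (c :: ·)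

theorem split1_cons_of (l : List Char) : ∃ h tl, split1 l = h :: tl := by
  cases l with
  | nil => exact ⟨[], [], rfl⟩
  | cons c t =>
    obtain ⟨h, tl, ht⟩ := split1_cons_of t
    by_cases hc : c = '?'
    · exact ⟨[], split1 t, by simp [split1, hc]⟩
    · exact ⟨c :: h, tl, by simp [split1, hc, ht]⟩

theorem nowild_split1 : ∀ l : List Char, ∀ p ∈ split1 l, '?' ∉ p := by
  intro l
  induction l with
  | nil => intro p hp; simp [split1] at hp; simp [hp]
  | cons c t ih =>
    intro p hp
    obtain ⟨h, tl, ht⟩ := split1_cons_of t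
    by_cases hc : c = '?'
    · rcases List.mem_cons.mp (by simpa [split1, hc] using hp) with rfl | hm
      · simp
      · exact ih p hm
    · rcases List.mem_cons.mp (by simpa [split1, hc, ht] using hp) with rfl | hm
      · intro hq
        rcases List.mem_cons.mp hq with h0 | h0
        · exact hc h0.symm
        · exact ih h (ht ▸ List.mem_cons_self) h0
      · exact ih p (ht ▸ List.mem_cons_of_mem _ hm)

def joinQ : List (List Char) → List Char
  | [] => []
  | [p] => p
  | p :: q :: t => p ++ '?' :: joinQ (q :: t)

theorem joinQ_split1 : ∀ l : List Char, joinQ (split1 l) = l := by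
  intro l
  induction l with
  | nil => rfl
  | cons c t ih =>
    obtain ⟨h, tl, ht⟩ := split1_cons_of t
    by_cases hc : c = '?'
    · simp only [split1, if_pos hc, ht, joinQ]
      rw [← ht, ih, hc]
      rfl
    · simp only [split1, if_neg hc, ht, List.modifyHead]
      cases tl with
      | nil =>
        have hh : h = t := by simpa [ht, joinQ] using ih
        simp [joinQ, hh]
      | cons q t' =>
        have hstep : joinQ ((c :: h) :: q :: t') = c :: joinQ (h :: q :: t') := by simp [joinQ]
        have ih' : joinQ (h :: q :: t') = t := by rw [← ht]; exact ih
        rw [hstep, ih']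

def Eparts : List (List Char) → List (List Char)
  | [] => [[]]
  | p :: t => (Eparts t).map (fun x => ('0' :: p) ++ x) ++ (Eparts t).map (fun x => ('1' :: p) ++ x)

theorem expand_joinQ : ∀ (rest : List (List Char)) (p : List Char),
    (∀ q ∈ p :: rest, '?' ∉ q) →
    expand (joinQ (p :: rest)) = (Eparts rest).map (p ++ ·) := by
  intro rest
  induction rest with
  | nil =>
    intro p hp
    simp [joinQ, Eparts, expand_nowild p (hp p (by simp))]
  | cons q t ih =>
    intro p hp
    have hjoin : joinQ (p :: q :: t) = p ++ '?' :: joinQ (q :: t) := by simp [joinQ]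
    rw [hjoin, expand_append_nowild p _ (hp p (by simp))]
    have hq : expand (joinQ (q :: t)) = (Eparts t).map (q ++ ·) :=
      ih q (fun r hr => hp r (List.mem_cons_of_mem _ hr))
    simp [expand, hq, Eparts, List.map_map, Function.comp_def]

theorem alt_foldl (rest : List (List Char)) :
    ∀ acc : List (List Char),
      rest.foldl (fun results part =>
          results.flatMap (fun r => [r ++ ['0'] ++ part, r ++ ['1'] ++ part])) acc
        = acc.flatMap (fun r => (Eparts rest).map (r ++ ·)) := by
  induction rest with
  | nil => intro acc; simp [Eparts]
  | cons p t ih =>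
    intro acc
    rw [List.foldl_cons, ih, List.flatMap_assoc]
    simp [Eparts, List.map_map, Function.comp_def, List.append_assoc]

theorem go_split1 (fuel : Nat) :
    ∀ (l cur : List Char) (acc : List (List Char)), l.length ≤ fuel →
      PySem.Chars.splitOn.go ['?'] fuel l cur acc
        = acc.reverse ++ (split1 l).modifyHead (fun h => cur.reverse ++ h) := by
  induction fuel with
  | zero =>
    intro l cur acc hl
    have : l = [] := List.length_eq_zero_iff.mp (Nat.le_zero.mp hl)
    subst this
    simp [PySem.Chars.splitOn.go, split1]
  | succ fuel ih =>
    intro l cur acc hl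
    cases l with
    | nil => simp [PySem.Chars.splitOn.go, split1]
    | cons c rest =>
      by_cases hc : c = '?'
      · subst hc
        rw [show PySem.Chars.splitOn.go ['?'] (fuel + 1) ('?' :: rest) cur acc
              = PySem.Chars.splitOn.go ['?'] fuel rest [] (cur.reverse :: acc) by
            simp [PySem.Chars.splitOn.go, List.isPrefixOf]]
        rw [ih rest [] _ (by simpa using hl)]
        obtain ⟨h, tl, ht⟩ := split1_cons_of rest
        simp [split1, ht, List.modifyHead]
      · rw [show PySem.Chars.splitOn.go ['?'] (fuel + 1) (c :: rest) cur acc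
              = PySem.Chars.splitOn.go ['?'] fuel rest (c :: cur) acc by
            simp only [PySem.Chars.splitOn.go, List.isPrefixOf]
            simp
            exact fun h => absurd h.symm hc]
        rw [ih rest (c :: cur) _ (by simpa using hl)]
        obtain ⟨h, tl, ht⟩ := split1_cons_of rest
        simp [split1, hc, ht, List.modifyHead]

theorem splitOn_eq_split1 (l : List Char) :
    PySem.Chars.splitOn l ['?'] = split1 l := by
  rw [PySem.Chars.splitOn, go_split1 (l.length + 1) l [] [] (by omega)]
  obtain ⟨h, tl, ht⟩ := split1_cons_of l
  simp [ht, List.modifyHead]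

theorem alt_eq_expand (str : String) :
    poss_recur_alt str = (expand str.toList).map String.ofList := by
  unfold poss_recur_alt
  rw [splitOn_eq_split1]
  obtain ⟨h, tl, ht⟩ := split1_cons_of str.toList
  rw [ht]
  simp only [List.headD_cons, List.drop_one, List.tail_cons]
  rw [alt_foldl]
  have hexp : expand str.toList = (Eparts tl).map (h ++ ·) := by
    rw [← joinQ_split1 str.toList, ht]
    exact expand_joinQ tl h (by rw [← ht]; exact nowild_split1 str.toList)
  rw [hexp]
  simp


-- ===== VERDICT (by name: the statement is the Claim_ definition above) =====
theorem poss_recur_spec : Claim_equal_poss_recur := by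
  intro str _
  unfold Spec_poss_recur
  rw [alt_eq_expand]
  have h := poss_recur_eq_expand (str.toList.count '?') str.toList le_rfl
  simpa using h
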